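-- pv_equiv track=rewrite | github.com/ShayManor/ChessBot | train.py | get_advantage
-- ===== SOURCE A (Python) =====
-- def get_advantage(fen):
--     piece_values = {
--         'P': 1, 'N': 3, 'B': 3, 'R': 5, 'Q': 9, 'K': 0,
--         'p': -1, 'n': -3, 'b': -3, 'r': -5, 'q': -9, 'k': 0
--     }
--     board_part = fen.split()[0]
--     advantage = 0
--     for rank in board_part.split('/'):
--         for char in rank:
--             if char.isdigit():
--                 continue
--             advantage += piece_values.get(char, 0)
--     return advantage
-- ===== SOURCE B (Python) =====
-- def get_advantage(fen):
--     board_part = fen.split()[0]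
--     counts = {}
--     for ch in board_part:
--         counts[ch] = counts.get(ch, 0) + 1
--     n = lambda p: counts.get(p, 0)
--     return ((n('P') - n('p'))
--             + 3 * (n('N') + n('B') - n('n') - n('b'))
--             + 5 * (n('R') - n('r'))
--             + 9 * (n('Q') - n('q')))
-- ===== Notes on version B (the rewrite author's own statement) =====
-- stated objective: alternative
-- what changed: B drops the piece_values dict and the per-character value accumulation: it builds a character frequency table in one pass and then returns a single closed-form weighted expression over the eight non-zero piece counts.
import Mathlib
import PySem

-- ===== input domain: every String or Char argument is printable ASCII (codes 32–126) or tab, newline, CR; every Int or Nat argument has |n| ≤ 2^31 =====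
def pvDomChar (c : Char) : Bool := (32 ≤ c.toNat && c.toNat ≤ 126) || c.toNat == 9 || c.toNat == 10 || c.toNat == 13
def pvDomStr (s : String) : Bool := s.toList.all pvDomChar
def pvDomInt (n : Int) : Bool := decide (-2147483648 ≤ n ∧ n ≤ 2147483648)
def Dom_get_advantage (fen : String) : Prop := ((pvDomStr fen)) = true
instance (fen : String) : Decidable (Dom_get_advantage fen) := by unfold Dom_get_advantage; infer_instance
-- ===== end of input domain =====

-- B drops the piece_values dict entirely: it builds a character frequency table in one pass and
-- returns a single closed-form weighted expression over the eight non-zero piece counts (objective: alternative).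

-- ===== PORT A =====
def pvPieceValues : PySem.Dict Char Int :=
  PySem.Dict.ofList [('P',1),('N',3),('B',3),('R',5),('Q',9),('K',0),
                     ('p',-1),('n',-3),('b',-3),('r',-5),('q',-9),('k',0)]

def get_advantage (fen : String) : Int :=
  match PySem.List.pyGet? (PySem.Chars.split₀ fen.toList) 0 with
  | none => 0   -- Python raises IndexError here; excluded by Pre_get_advantage
  | some board_part =>
    (PySem.Chars.splitOn board_part ['/']).foldl (fun advantage rank =>
      rank.foldl (fun advantage ch =>
        if PySem.Chars.strIsdigit [ch] then advantage
        else advantage + pvPieceValues.getD ch 0) advantage) 0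

-- ===== PORT B =====
def get_advantage_alt (fen : String) : Int :=
  match PySem.List.pyGet? (PySem.Chars.split₀ fen.toList) 0 with
  | none => 0   -- Python raises IndexError here; excluded by Pre_get_advantage
  | some board_part =>
    let counts := board_part.foldl (fun d ch => d.insert ch (d.getD ch 0 + 1))
                    (PySem.Dict.empty : PySem.Dict Char Int)
    let n := fun p => counts.getD p 0
    (n 'P' - n 'p')
      + 3 * (n 'N' + n 'B' - n 'n' - n 'b')
      + 5 * (n 'R' - n 'r')
      + 9 * (n 'Q' - n 'q')

-- ===== PRECONDITION & SPEC =====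
-- Pre_ excludes exactly the whitespace-only strings, on which fen.split() is empty and A raises IndexError.
def Pre_get_advantage (fen : String) : Prop := PySem.Chars.split₀ fen.toList ≠ []
instance (fen : String) : Decidable (Pre_get_advantage fen) := by unfold Pre_get_advantage; infer_instance
def pvWitness_get_advantage : String := "rnbqkbnr/pppppppp/8/8/8/8/PPPPPPPP/RNBQKBNR w KQkq - 0 1"

def Spec_get_advantage (fen : String) (out : Int) : Prop := out = get_advantage_alt fen
instance (fen : String) (out : Int) : Decidable (Spec_get_advantage fen out) := by unfold Spec_get_advantage; infer_instance

-- ===== CLAIM (what is proved, stated in full; the proofs are below) =====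
def Claim_equal_get_advantage : Prop := ∀ (fen : String), Dom_get_advantage fen → Pre_get_advantage fen → Spec_get_advantage fen (get_advantage fen)

-- ===== LEMMAS AND PROOFS =====

lemma pvMkEq : pvPieceValues = PySem.Dict.mk [('P',1),('N',3),('B',3),('R',5),('Q',9),('K',0),
                     ('p',-1),('n',-3),('b',-3),('r',-5),('q',-9),('k',0)] := by rfl

-- the value A adds for one char of a rank
def pvG (c : Char) : Int := if PySem.Chars.strIsdigit [c] = true then 0 else pvPieceValues.getD c 0

lemma pvGetD_digit (c : Char) (h : PySem.Chars.isdigit c = true) : pvPieceValues.getD c 0 = 0 := by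
  simp only [PySem.Chars.isdigit, Bool.and_eq_true, decide_eq_true_eq] at h
  obtain ⟨h1, h2⟩ := h
  rw [pvMkEq]
  simp only [PySem.Dict.getD, PySem.Dict.get?_mk_cons]
  rw [if_neg, if_neg, if_neg, if_neg, if_neg, if_neg, if_neg, if_neg, if_neg, if_neg, if_neg, if_neg]
  · rfl
  all_goals (intro heq; rw [beq_iff_eq] at heq; subst heq)
  all_goals (revert h1 h2; decide)

lemma pvG_eq (c : Char) : pvG c = pvPieceValues.getD c 0 := by
  unfold pvG
  split_ifs with h
  · rw [pvGetD_digit c]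
    simpa [PySem.Chars.strIsdigit] using h
  · rfl

-- sum of A's inner loop over one rank
lemma pvInner (rank : List Char) (a : Int) :
    rank.foldl (fun advantage ch =>
      if PySem.Chars.strIsdigit [ch] then advantage
      else advantage + pvPieceValues.getD ch 0) a = a + (rank.map pvG).sum := by
  have hfun : (fun (advantage : Int) ch =>
      if PySem.Chars.strIsdigit [ch] then advantage
      else advantage + pvPieceValues.getD ch 0)
      = fun (advantage : Int) ch => advantage + pvG ch := by
    funext a c
    unfold pvG
    split_ifs <;> simp
  rw [hfun, PySem.List.foldl_add]

-- invariant of the fuel-driven split loop: total pvG-sum of all pieces produced so far plus the rest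
lemma pvGoSum (fuel : Nat) : ∀ (l cur : List Char) (accs : List (List Char)), l.length ≤ fuel →
    ((PySem.Chars.splitOn.go ['/'] fuel l cur accs).map (fun r => (r.map pvG).sum)).sum
      = (accs.map (fun r => (r.map pvG).sum)).sum + (cur.map pvG).sum
        + ((l.filter (fun c => c ≠ '/')).map pvG).sum := by
  induction fuel with
  | zero =>
    intro l cur accs hf
    have hl : l = [] := List.length_eq_zero_iff.mp (Nat.le_zero.mp hf)
    subst hl
    simp [PySem.Chars.splitOn.go]
  | succ fuel ih =>
    intro l cur accs hf
    cases l with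
    | nil => simp [PySem.Chars.splitOn.go]
    | cons c rest =>
      by_cases hc : c = '/'
      · subst hc
        have : PySem.Chars.splitOn.go ['/'] (fuel+1) ('/'::rest) cur accs
            = PySem.Chars.splitOn.go ['/'] fuel rest [] (cur.reverse :: accs) := by
          simp [PySem.Chars.splitOn.go, List.isPrefixOf]
        rw [this, ih rest [] (cur.reverse :: accs) (by simpa using hf)]
        simp
        ring
      · have : PySem.Chars.splitOn.go ['/'] (fuel+1) (c::rest) cur accs
            = PySem.Chars.splitOn.go ['/'] fuel rest (c :: cur) accs := by
          simp [PySem.Chars.splitOn.go, List.isPrefixOf, Ne.symm hc]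
        rw [this, ih rest (c :: cur) accs (by simpa using hf)]
        simp [hc]
        ring

lemma pvSplitSum (bp : List Char) :
    (((PySem.Chars.splitOn bp ['/']).map (fun r => (r.map pvG).sum)).sum
      = ((bp.filter (fun c => c ≠ '/')).map pvG).sum) := by
  unfold PySem.Chars.splitOn
  rw [pvGoSum (bp.length + 1) bp [] [] (by omega)]
  simp

lemma pvFilterSlash (cs : List Char) :
    ((cs.filter (fun c => c ≠ '/')).map pvG).sum
      = (cs.map (fun c => pvPieceValues.getD c 0)).sum := by
  induction cs with
  | nil => simp
  | cons c rest ih =>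
    by_cases hc : c = '/'
    · subst hc
      have h0 : pvPieceValues.getD '/' 0 = 0 := by decide
      simp only [List.filter_cons, List.map_cons, List.sum_cons, h0]
      simpa using ih
    · simp only [List.filter_cons, List.map_cons, List.sum_cons]
      have : (decide ¬c = '/') = true := by simp [hc]
      simp only [this, if_true, List.map_cons, List.sum_cons, pvG_eq]
      rw [ih]

lemma pvGetD_notPiece (c : Char)
    (hc : c ∉ (['P','N','B','R','Q','K','p','n','b','r','q','k'] : List Char)) :
    pvPieceValues.getD c 0 = 0 := by
  simp only [List.mem_cons, List.not_mem_nil, or_false] at hc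
  push Not at hc
  obtain ⟨n1,n2,n3,n4,n5,n6,n7,n8,n9,n10,n11,n12⟩ := hc
  simp [pvMkEq, PySem.Dict.getD, PySem.Dict.get?,
    Ne.symm n1, Ne.symm n2, Ne.symm n3, Ne.symm n4, Ne.symm n5, Ne.symm n6,
    Ne.symm n7, Ne.symm n8, Ne.symm n9, Ne.symm n10, Ne.symm n11, Ne.symm n12]

-- A's per-char value sum equals B's closed-form weighted count expression
lemma pvSumEqCounts (cs : List Char) :
    (cs.map (fun c => pvPieceValues.getD c 0)).sum
      = ((cs.count 'P' : Int) - (cs.count 'p' : Int))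
        + 3 * ((cs.count 'N' : Int) + (cs.count 'B' : Int) - (cs.count 'n' : Int) - (cs.count 'b' : Int))
        + 5 * ((cs.count 'R' : Int) - (cs.count 'r' : Int))
        + 9 * ((cs.count 'Q' : Int) - (cs.count 'q' : Int)) := by
  induction cs with
  | nil => simp
  | cons c rest ih =>
    simp only [List.map_cons, List.sum_cons, List.count_cons, ih]
    by_cases hc : c ∈ (['P','N','B','R','Q','K','p','n','b','r','q','k'] : List Char)
    · fin_cases hc <;> simp [pvMkEq, PySem.Dict.getD, PySem.Dict.get?, List.find?] <;> omega
    · rw [pvGetD_notPiece c hc]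
      simp only [List.mem_cons, List.not_mem_nil, or_false] at hc
      push Not at hc
      obtain ⟨n1,n2,n3,n4,n5,n6,n7,n8,n9,n10,n11,n12⟩ := hc
      simp only [beq_iff_eq, if_neg n1, if_neg n2, if_neg n3, if_neg n4, if_neg n5,
        if_neg n7, if_neg n8, if_neg n9, if_neg n10, if_neg n11]
      omega

-- ===== VERDICT (by name: the statement is the Claim_ definition above) =====
theorem get_advantage_spec : Claim_equal_get_advantage := by
  intro fen _ hpre
  unfold Spec_get_advantage get_advantage get_advantage_alt
  obtain ⟨bp, rest, heq⟩ := List.exists_cons_of_ne_nil hpre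
  rw [heq]
  have h0 : PySem.List.pyGet? (bp :: rest) (0 : Int) = some bp := by
    simp [PySem.List.pyGet?, PySem.List.pyIdx?]
  rw [h0]
  simp only []
  have hcnt : ∀ p : Char,
      ((bp.foldl (fun d ch => d.insert ch (d.getD ch 0 + 1))
          (PySem.Dict.empty : PySem.Dict Char Int)).getD p 0) = (bp.count p : Int) := by
    intro p
    rw [PySem.Dict.getD_foldl_insert_add_one]
    simp
  have hA : (PySem.Chars.splitOn bp ['/']).foldl (fun advantage rank =>
      rank.foldl (fun advantage ch =>
        if PySem.Chars.strIsdigit [ch] then advantage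
        else advantage + pvPieceValues.getD ch 0) advantage) 0
      = ((PySem.Chars.splitOn bp ['/']).map (fun r => (r.map pvG).sum)).sum := by
    have hfun : (fun (advantage : Int) (rank : List Char) =>
        rank.foldl (fun advantage ch =>
          if PySem.Chars.strIsdigit [ch] then advantage
          else advantage + pvPieceValues.getD ch 0) advantage)
        = fun (advantage : Int) (rank : List Char) => advantage + (rank.map pvG).sum := by
      funext a r
      exact pvInner r a
    rw [hfun, PySem.List.foldl_add]
    simp
  rw [hA, pvSplitSum, pvFilterSlash, pvSumEqCounts]
  simp only [hcnt]
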